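-- pv_equiv track=rewrite | github.com/soolabettu/euler | 87.py | solve
-- ===== SOURCE A (Python) =====
-- def sieve_primes(limit: int) -> list[int]:
--     """Return a list of primes up to and including limit using Sieve of Eratosthenes."""
--     sieve = [True] * (limit + 1)
--     sieve[0] = sieve[1] = False  # 0 and 1 are not primes
--
--     p = 2
--     while p * p <= limit:
--         if sieve[p]:
--             # Mark all multiples of p as not prime
--             for multiple in range(p * p, limit + 1, p):
--                 sieve[multiple] = False
--         p += 1
--
--     return [i for i, is_prime in enumerate(sieve) if is_prime and i * i <= limit]
--
-- def solve(limit):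
--     primes = sieve_primes(limit)
--     bucket1 = [prime**2 for prime in primes if prime**2 < 50_000_000]
--     bucket2 = [prime**3 for prime in primes if prime**3 < 50_000_000]
--     bucket3 = [prime**4 for prime in primes if prime**4 < 50_000_000]
--     uniq_sums = set()
--     for b1 in bucket1:
--         for b2 in bucket2:
--             for b3 in bucket3:
--                 x = b1 + b2 + b3
--                 if x < limit:
--                     uniq_sums.add(x)
--
--     return len(uniq_sums)
-- ===== SOURCE B (Python) =====
-- def solve(limit):
--     # primes p with p*p <= limit, found by trial division (no sieve, no memory ~ limit)
--     primes = []
--     p = 2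
--     while p * p <= limit:
--         if all(p % d for d in range(2, p)):
--             primes.append(p)
--         p += 1
--     squares = [p**2 for p in primes if p**2 < 50_000_000]
--     cubes = [p**3 for p in primes if p**3 < 50_000_000]
--     fourths = [p**4 for p in primes if p**4 < 50_000_000]
--     # stage 1: distinct p^2 + q^3 pair sums; stage 2: add each fourth power, keep sums < limit
--     pair_sums = {s + c for s in squares for c in cubes}
--     uniq_sums = {ps + f for ps in pair_sums for f in fourths if ps + f < limit}
--     return len(uniq_sums)
-- ===== Notes on version B (the rewrite author's own statement) =====
-- stated objective: faster
-- what changed: B discards the Sieve of Eratosthenes in favour of direct trial-division generation of the primes up to sqrt(limit) (no O(limit) boolean table to allocate and scan), and replaces the fused triple-nested loop by a two-phase decomposition: first the set of distinct p^2+q^3 pair sums, then each pair sum combined with each fourth power below limit.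
-- outside the precondition, e.g. on solve(0): A raises IndexError, B returns 0
import Mathlib
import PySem

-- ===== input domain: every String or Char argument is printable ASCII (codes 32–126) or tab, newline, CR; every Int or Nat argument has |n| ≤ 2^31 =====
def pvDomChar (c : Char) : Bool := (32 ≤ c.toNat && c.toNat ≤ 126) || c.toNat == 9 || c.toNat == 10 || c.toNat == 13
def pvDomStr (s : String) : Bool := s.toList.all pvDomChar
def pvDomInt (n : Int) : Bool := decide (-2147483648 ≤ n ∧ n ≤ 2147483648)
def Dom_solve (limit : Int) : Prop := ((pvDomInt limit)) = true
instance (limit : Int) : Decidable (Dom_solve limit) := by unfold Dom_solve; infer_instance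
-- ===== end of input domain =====

-- B drops the O(limit)-table sieve for trial-division prime generation and replaces A's fused
-- triple loop by a staged pair-sum/fourth-power decomposition; objective: faster (measured).

-- ===== PORT A =====
-- helper sieve_primes (Sieve of Eratosthenes); the sieve list is held in an Array and
-- sieve[i] = False is ported by hand as Array.setIfInBounds (exact for the in-range
-- non-negative indices the sieve writes; out of range the Python raises, excluded by Pre_)
lemma sieveLoop_dec {limit p : Int} (h : p * p ≤ limit) :
    (limit + 1 - (p + 1)).toNat < (limit + 1 - p).toNat := by
  have h1 : 0 ≤ (2 * p - 1) * (2 * p - 1) := mul_self_nonneg _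
  have hp : p ≤ limit := by nlinarith
  omega

-- while p * p <= limit: if sieve[p]: for multiple in range(p*p, limit+1, p): …; p += 1
def sieveLoop (limit p : Int) (sv : Array Bool) : Array Bool :=
  if h : p * p ≤ limit then
    let sv' :=
      if sv.getD p.toNat false then
        (PySem.List.pyRange (p * p) (limit + 1) p).foldl
          (fun (sv : Array Bool) m => sv.setIfInBounds m.toNat false) sv
      else sv
    sieveLoop limit (p + 1) sv'
  else sv
termination_by (limit + 1 - p).toNat
decreasing_by exact sieveLoop_dec h

def sievePrimes (limit : Int) : List Int :=
  let sieve0 := Array.setIfInBounds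
    (Array.setIfInBounds (Array.replicate (limit + 1).toNat true) 0 false) 1 false
  let sieve := sieveLoop limit 2 sieve0
  -- [i for i, is_prime in enumerate(sieve) if is_prime and i * i <= limit],
  -- ported as a tail-recursive fold carrying the running index i
  (sieve.toList.foldl (fun (acc : List Int × Int) b =>
    (if b && decide (acc.2 * acc.2 ≤ limit) then acc.1 ++ [acc.2] else acc.1, acc.2 + 1))
    ([], 0)).1

def solve (limit : Int) : Int :=
  let primes := sievePrimes limit
  let bucket1 := (primes.filter (fun p => p ^ 2 < 50000000)).map (fun p => p ^ 2)
  let bucket2 := (primes.filter (fun p => p ^ 3 < 50000000)).map (fun p => p ^ 3)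
  let bucket3 := (primes.filter (fun p => p ^ 4 < 50000000)).map (fun p => p ^ 4)
  let uniqSums : PySem.Set Int :=
    bucket1.foldl (fun s b1 =>
      bucket2.foldl (fun s b2 =>
        bucket3.foldl (fun s b3 =>
          let x := b1 + b2 + b3
          if x < limit then PySem.Set.add s x else s) s) s) PySem.Set.empty
  PySem.Set.len uniqSums

-- ===== PORT B =====
-- while p * p <= limit: if all(p % d for d in range(2, p)): primes.append(p); p += 1
def trialLoop (limit p : Int) (primes : List Int) : List Int :=
  if _h : p * p ≤ limit then
    trialLoop limit (p + 1)
      (if (PySem.List.pyRange 2 p 1).all (fun d => PySem.Int.mod p d != 0)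
       then primes ++ [p] else primes)
  else primes
termination_by (limit + 1 - p).toNat
decreasing_by exact sieveLoop_dec _h

def solve_alt (limit : Int) : Int :=
  let primes := trialLoop limit 2 []
  let squares := (primes.filter (fun p => p ^ 2 < 50000000)).map (fun p => p ^ 2)
  let cubes := (primes.filter (fun p => p ^ 3 < 50000000)).map (fun p => p ^ 3)
  let fourths := (primes.filter (fun p => p ^ 4 < 50000000)).map (fun p => p ^ 4)
  -- stage 1: all distinct p^2 + q^3 pair sums
  let pairSums : PySem.Set Int :=
    squares.foldl (fun s sq =>
      cubes.foldl (fun s c => PySem.Set.add s (sq + c)) s) PySem.Set.empty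
  -- stage 2: combine each pair sum with each fourth power, keeping sums below limit
  let uniqSums : PySem.Set Int :=
    pairSums.foldl (fun s ps =>
      fourths.foldl (fun s f =>
        if ps + f < limit then PySem.Set.add s (ps + f) else s) s) PySem.Set.empty
  PySem.Set.len uniqSums

-- ===== PRECONDITION & SPEC =====
-- Pre_ excludes limit ≤ 0, on which A raises IndexError while assigning sieve[0]/sieve[1].
def Pre_solve (limit : Int) : Prop := 1 ≤ limit
instance (limit : Int) : Decidable (Pre_solve limit) := by unfold Pre_solve; infer_instance
def pvWitness_solve : Int := 30

def Spec_solve (limit : Int) (out : Int) : Prop := out = solve_alt limit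
instance (limit : Int) (out : Int) : Decidable (Spec_solve limit out) := by unfold Spec_solve; infer_instance

-- ===== CLAIM (what is proved, stated in full; the proofs are below) =====
def Claim_equal_solve : Prop := ∀ (limit : Int), Dom_solve limit → Pre_solve limit → Spec_solve limit (solve limit)

-- ===== LEMMAS AND PROOFS =====

-- ---------- generic fold/set lemmas (shared by both set computations) ----------

-- membership through a fold whose step extends membership by Q
lemma mem_foldl_step {α β : Type} (F : List α → β → List α) (Q : β → α → Prop)
    (h : ∀ s b x, x ∈ F s b ↔ x ∈ s ∨ Q b x) :
    ∀ (L : List β) (s : List α) (x : α), x ∈ L.foldl F s ↔ x ∈ s ∨ ∃ b ∈ L, Q b x := by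
  intro L
  induction L with
  | nil => simp
  | cons b L ih =>
    intro s x
    simp only [List.foldl_cons, ih, h, List.mem_cons]
    constructor
    · rintro ((hs | hq) | ⟨b', hb', hq'⟩)
      · exact Or.inl hs
      · exact Or.inr ⟨b, Or.inl rfl, hq⟩
      · exact Or.inr ⟨b', Or.inr hb', hq'⟩
    · rintro (hs | ⟨b', (rfl | hb'), hq'⟩)
      · exact Or.inl (Or.inl hs)
      · exact Or.inl (Or.inr hq')
      · exact Or.inr ⟨b', hb', hq'⟩

-- a fold whose step preserves Nodup preserves Nodup
lemma nodup_foldl_step {α β : Type} (F : List α → β → List α)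
    (h : ∀ s b, s.Nodup → (F s b).Nodup) :
    ∀ (L : List β) (s : List α), s.Nodup → (L.foldl F s).Nodup := by
  intro L
  induction L with
  | nil => intro s hs; simpa using hs
  | cons b L ih => intro s hs; exact ih _ (h s b hs)

lemma mem_add_if {s : List Int} {c : Prop} [Decidable c] {v x : Int} :
    x ∈ (if c then PySem.Set.add s v else s) ↔ x ∈ s ∨ (c ∧ x = v) := by
  split_ifs with hc
  · simp [PySem.Set.mem_add, hc]
  · simp [hc]

lemma nodup_add_if {s : List Int} {c : Prop} [Decidable c] {v : Int} (hs : s.Nodup) :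
    (if c then PySem.Set.add s v else s).Nodup := by
  split_ifs
  · exact PySem.Set.nodup_add s v hs
  · exact hs

-- membership in A's triple-loop set
lemma mem_tripleFold (limit : Int) (B1 B2 B3 : List Int) (x : Int) :
    x ∈ B1.foldl (fun s b1 =>
          B2.foldl (fun s b2 =>
            B3.foldl (fun s b3 =>
              let y := b1 + b2 + b3
              if y < limit then PySem.Set.add s y else s) s) s) ([] : List Int)
      ↔ ∃ b1 ∈ B1, ∃ b2 ∈ B2, ∃ b3 ∈ B3, b1 + b2 + b3 < limit ∧ x = b1 + b2 + b3 := by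
  rw [mem_foldl_step _ (fun b1 x => ∃ b2 ∈ B2, ∃ b3 ∈ B3, b1 + b2 + b3 < limit ∧ x = b1 + b2 + b3)
      (fun s b1 x => by
        rw [mem_foldl_step _ (fun b2 x => ∃ b3 ∈ B3, b1 + b2 + b3 < limit ∧ x = b1 + b2 + b3)
            (fun s b2 x => by
              rw [mem_foldl_step _ (fun b3 x => b1 + b2 + b3 < limit ∧ x = b1 + b2 + b3)
                  (fun s b3 x => mem_add_if)])])]
  simp

lemma nodup_tripleFold (limit : Int) (B1 B2 B3 : List Int) :
    (B1.foldl (fun s b1 =>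
        B2.foldl (fun s b2 =>
          B3.foldl (fun s b3 =>
            let y := b1 + b2 + b3
            if y < limit then PySem.Set.add s y else s) s) s) ([] : List Int)).Nodup := by
  exact nodup_foldl_step _
    (fun s b1 hs => nodup_foldl_step _
      (fun s b2 hs => nodup_foldl_step _ (fun s b3 hs => nodup_add_if hs) B3 s hs) B2 s hs)
    B1 [] List.nodup_nil

-- membership in B's pair-sum set
lemma mem_pairFold (B1 B2 : List Int) (x : Int) :
    x ∈ B1.foldl (fun s b1 =>
          B2.foldl (fun s b2 => PySem.Set.add s (b1 + b2)) s) ([] : List Int)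
      ↔ ∃ b1 ∈ B1, ∃ b2 ∈ B2, x = b1 + b2 := by
  rw [mem_foldl_step _ (fun b1 x => ∃ b2 ∈ B2, x = b1 + b2)
      (fun s b1 x => by
        rw [mem_foldl_step _ (fun b2 x => x = b1 + b2)
            (fun s b2 x => PySem.Set.mem_add s (b1 + b2) x)])]
  simp

-- membership in B's final staged set, over any list P of pair sums
lemma mem_stageFold (limit : Int) (P B3 : List Int) (x : Int) :
    x ∈ P.foldl (fun s ps =>
          B3.foldl (fun s b3 =>
            if ps + b3 < limit then PySem.Set.add s (ps + b3) else s) s) ([] : List Int)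
      ↔ ∃ ps ∈ P, ∃ b3 ∈ B3, ps + b3 < limit ∧ x = ps + b3 := by
  rw [mem_foldl_step _ (fun ps x => ∃ b3 ∈ B3, ps + b3 < limit ∧ x = ps + b3)
      (fun s ps x => by
        rw [mem_foldl_step _ (fun b3 x => ps + b3 < limit ∧ x = ps + b3)
            (fun s b3 x => mem_add_if)])]
  simp

lemma nodup_stageFold (limit : Int) (P B3 : List Int) :
    (P.foldl (fun s ps =>
        B3.foldl (fun s b3 =>
          if ps + b3 < limit then PySem.Set.add s (ps + b3) else s) s) ([] : List Int)).Nodup := by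
  exact nodup_foldl_step _
    (fun s ps hs => nodup_foldl_step _ (fun s b3 hs => nodup_add_if hs) B3 s hs)
    P [] List.nodup_nil

-- the core set fact: A's fused set and B's staged set have the same length
lemma main_len (limit : Int) (B1 B2 B3 : List Int) :
    PySem.Set.len
      (B1.foldl (fun s b1 =>
        B2.foldl (fun s b2 =>
          B3.foldl (fun s b3 =>
            let y := b1 + b2 + b3
            if y < limit then PySem.Set.add s y else s) s) s) ([] : List Int))
    = PySem.Set.len
      ((B1.foldl (fun s b1 =>
          B2.foldl (fun s b2 => PySem.Set.add s (b1 + b2)) s) ([] : List Int)).foldl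
        (fun s ps =>
          B3.foldl (fun s b3 =>
            if ps + b3 < limit then PySem.Set.add s (ps + b3) else s) s) ([] : List Int)) := by
  have hmem : ∀ x, x ∈ (B1.foldl (fun s b1 =>
        B2.foldl (fun s b2 =>
          B3.foldl (fun s b3 =>
            let y := b1 + b2 + b3
            if y < limit then PySem.Set.add s y else s) s) s) ([] : List Int))
      ↔ x ∈ ((B1.foldl (fun s b1 =>
          B2.foldl (fun s b2 => PySem.Set.add s (b1 + b2)) s) ([] : List Int)).foldl
        (fun s ps =>
          B3.foldl (fun s b3 =>
            if ps + b3 < limit then PySem.Set.add s (ps + b3) else s) s) ([] : List Int)) := by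
    intro x
    rw [mem_tripleFold, mem_stageFold]
    constructor
    · rintro ⟨b1, hb1, b2, hb2, b3, hb3, hlt, rfl⟩
      exact ⟨b1 + b2, (mem_pairFold B1 B2 _).mpr ⟨b1, hb1, b2, hb2, rfl⟩, b3, hb3, hlt, rfl⟩
    · rintro ⟨ps, hps, b3, hb3, hlt, rfl⟩
      obtain ⟨b1, hb1, b2, hb2, rfl⟩ := (mem_pairFold B1 B2 _).mp hps
      exact ⟨b1, hb1, b2, hb2, b3, hb3, hlt, rfl⟩
  have hperm := (List.perm_ext_iff_of_nodup (nodup_tripleFold limit B1 B2 B3)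
      (nodup_stageFold limit _ B3)).mpr hmem
  simpa [PySem.Set.len] using congrArg (fun n : Nat => (n : Int)) hperm.length_eq

-- ---------- the prime-list equality: sievePrimes limit = trialLoop limit 2 [] ----------

-- the predicate the sieve maintains: i survives all marking rounds of primes below p
def sievePred (p : Int) (i : Nat) : Prop :=
  2 ≤ i ∧ ∀ q : Nat, Nat.Prime q → (q : Int) < p → q * q ≤ i → ¬ q ∣ i

def SieveInv (limit p : Int) (sv : Array Bool) : Prop :=
  sv.size = (limit + 1).toNat ∧
    ∀ i : Nat, i < (limit + 1).toNat → (sv.getD i false = true ↔ sievePred p i)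

lemma getD_setIfInBounds_false (a : Array Bool) (j i : Nat) :
    (a.setIfInBounds j false).getD i false = if i = j then false else a.getD i false := by
  simp only [Array.getD_eq_getD_getElem?, Array.getElem?_setIfInBounds]
  by_cases h : i = j
  · subst h
    by_cases hs : i < a.size <;> simp [hs]
  · rw [if_neg (fun hh => h hh.symm), if_neg h]

lemma markFold_getD (L : List Int) (sv : Array Bool) (i : Nat) :
    (L.foldl (fun sv m => sv.setIfInBounds m.toNat false) sv).getD i false
    = if i ∈ L.map Int.toNat then false else sv.getD i false := by
  induction L generalizing sv with
  | nil => simp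
  | cons m t ih =>
    simp only [List.foldl_cons, ih, List.map_cons, List.mem_cons]
    by_cases hm : i ∈ t.map Int.toNat
    · simp [hm]
    · simp only [hm, if_false, getD_setIfInBounds_false]
      by_cases he : i = m.toNat <;> simp [he]

lemma markFold_size (L : List Int) (sv : Array Bool) :
    (L.foldl (fun sv m => sv.setIfInBounds m.toNat false) sv).size = sv.size := by
  induction L generalizing sv with
  | nil => rfl
  | cons m t ih => simp [List.foldl_cons, ih, Array.size_setIfInBounds]

-- effect of one marking round on getD, for indices i ≤ limit
lemma marked_getD (limit p : Int) (hp : 0 < p) (sv : Array Bool) (i : Nat) (hi : (i : Int) ≤ limit) :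
    ((PySem.List.pyRange (p * p) (limit + 1) p).foldl
        (fun sv m => sv.setIfInBounds m.toNat false) sv).getD i false
    = if p * p ≤ (i : Int) ∧ p ∣ (i : Int) then false else sv.getD i false := by
  rw [markFold_getD]
  congr 1
  simp only [List.mem_map, eq_iff_iff]
  constructor
  · rintro ⟨m, hm, rfl⟩
    obtain ⟨h1, h2, h3⟩ := (PySem.List.mem_pyRange_iff_of_pos hp m).mp hm
    have hm0 : 0 ≤ m := le_trans (by positivity) h1
    rw [Int.toNat_of_nonneg hm0]
    refine ⟨h1, ?_⟩
    have hd : p ∣ (m - p * p) + p * p := dvd_add h3 (dvd_mul_right p p)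
    simpa using hd
  · rintro ⟨h1, h2⟩
    exact ⟨(i : Int), (PySem.List.mem_pyRange_iff_of_pos hp _).mpr
      ⟨h1, by omega, dvd_sub h2 (dvd_mul_right p p)⟩, by simp⟩

-- a composite number has a prime divisor whose square does not exceed it
lemma not_prime_witness {n : Nat} (h2 : 2 ≤ n) (hn : ¬ Nat.Prime n) :
    ∃ q, Nat.Prime q ∧ q ∣ n ∧ q * q ≤ n ∧ q < n := by
  have hsq : n.minFac * n.minFac ≤ n := by
    have := Nat.minFac_sq_le_self (by omega) hn
    simpa [pow_two] using this
  have h2q : 2 ≤ n.minFac := (Nat.minFac_prime (by omega : n ≠ 1)).two_le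
  exact ⟨n.minFac, Nat.minFac_prime (by omega), Nat.minFac_dvd n, hsq, by nlinarith⟩

-- sieve[p] is still true exactly when p is prime
lemma sievePred_self {p : Int} (h2 : 2 ≤ p) : sievePred p p.toNat ↔ Nat.Prime p.toNat := by
  have hcast : ((p.toNat : Int)) = p := Int.toNat_of_nonneg (by omega)
  constructor
  · rintro ⟨hge, hall⟩
    by_contra hnp
    obtain ⟨q, hq, hqd, hqs, hql⟩ := not_prime_witness hge hnp
    exact hall q hq (by omega) hqs hqd
  · intro hp
    refine ⟨hp.two_le, fun q hq hql hqs hqd => ?_⟩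
    have hqe := (Nat.prime_dvd_prime_iff_eq hq hp).mp hqd
    subst hqe
    omega

-- final characterisation: survived all rounds + square below limit ↔ prime
lemma predF_iff_prime {limit : Int} {j : Nat} (hj : (j : Int) * (j : Int) ≤ limit) :
    (2 ≤ j ∧ ∀ q : Nat, Nat.Prime q → (q : Int) * (q : Int) ≤ limit → q * q ≤ j → ¬ q ∣ j)
    ↔ Nat.Prime j := by
  constructor
  · rintro ⟨h2, hall⟩
    by_contra hnp
    obtain ⟨q, hq, hqd, hqs, hql⟩ := not_prime_witness h2 hnp
    have h1 : (q : Int) * (q : Int) ≤ (j : Int) := by exact_mod_cast hqs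
    have h2' : (j : Int) ≤ (j : Int) * (j : Int) := by nlinarith [Int.natCast_nonneg j]
    exact hall q hq (by linarith) hqs hqd
  · intro hp
    refine ⟨hp.two_le, fun q hq _ hqs hqd => ?_⟩
    have hqe := (Nat.prime_dvd_prime_iff_eq hq hp).mp hqd
    subst hqe
    have := hp.two_le
    nlinarith

-- the sieve loop: from the invariant at p to the final characterisation
lemma sieveLoop_char (limit : Int) : ∀ (n : Nat) (p : Int) (sv : Array Bool),
    n = (limit + 1 - p).toNat → 2 ≤ p → SieveInv limit p sv →
    (sieveLoop limit p sv).size = (limit + 1).toNat ∧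
      ∀ i : Nat, i < (limit + 1).toNat →
        ((sieveLoop limit p sv).getD i false = true ↔
          2 ≤ i ∧ ∀ q : Nat, Nat.Prime q → ((q : Int) < p ∨ (q : Int) * (q : Int) ≤ limit) →
            q * q ≤ i → ¬ q ∣ i) := by
  intro n
  induction n using Nat.strong_induction_on with
  | _ n ih =>
    rintro p sv hn hp2 ⟨hsz, hinv⟩
    rw [sieveLoop]
    by_cases hpl : p * p ≤ limit
    · rw [dif_pos hpl]
      have hdec : (limit + 1 - (p + 1)).toNat < n := hn ▸ sieveLoop_dec hpl
      have hplim : p ≤ limit := by nlinarith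
      have hcast : ((p.toNat : Int)) = p := Int.toNat_of_nonneg (by omega)
      have hpn : p.toNat < (limit + 1).toNat := by omega
      -- equivalence of the two final guard conditions, given p² ≤ limit
      have hguard : ∀ q : Nat, ((q : Int) < p + 1 ∨ (q : Int) * (q : Int) ≤ limit) ↔
          ((q : Int) < p ∨ (q : Int) * (q : Int) ≤ limit) := by
        intro q
        constructor
        · rintro (h | h)
          · by_cases hqp : (q : Int) < p
            · exact Or.inl hqp
            · have hqe : (q : Int) = p := by omega
              exact Or.inr (by rw [hqe]; exact hpl)
          · exact Or.inr h
        · rintro (h | h)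
          · exact Or.inl (by omega)
          · exact Or.inr h
      by_cases hb : sv.getD p.toNat false = true
      · -- p is prime; multiples of p from p² get marked
        have hprime : Nat.Prime p.toNat := (sievePred_self hp2).mp ((hinv _ hpn).mp hb)
        rw [if_pos hb]
        have hinv' : SieveInv limit (p + 1)
            ((PySem.List.pyRange (p * p) (limit + 1) p).foldl
              (fun sv m => sv.setIfInBounds m.toNat false) sv) := by
          refine ⟨by rw [markFold_size]; exact hsz, fun i hi => ?_⟩
          rw [marked_getD limit p (by omega) sv i (by omega)]
          constructor
          · intro hgi
            by_cases hmk : p * p ≤ (i : Int) ∧ p ∣ (i : Int)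
            · rw [if_pos hmk] at hgi; exact absurd hgi (by simp)
            · rw [if_neg hmk] at hgi
              obtain ⟨h2i, hall⟩ := (hinv i hi).mp hgi
              refine ⟨h2i, fun q hq hql hqs hqd => ?_⟩
              by_cases hqp : (q : Int) < p
              · exact hall q hq hqp hqs hqd
              · have hqe : (q : Int) = p := by omega
                exact hmk ⟨by rw [← hqe]; exact_mod_cast hqs, by rw [← hqe]; exact_mod_cast hqd⟩
          · rintro ⟨h2i, hall⟩
            have hnmk : ¬ (p * p ≤ (i : Int) ∧ p ∣ (i : Int)) := by
              rintro ⟨hms, hmd⟩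
              have h1 : p.toNat * p.toNat ≤ i := by
                have : ((p.toNat : Int)) * ((p.toNat : Int)) ≤ (i : Int) := by
                  rw [hcast]; exact hms
                exact_mod_cast this
              have h2 : p.toNat ∣ i := by
                have : ((p.toNat : Int)) ∣ (i : Int) := by rw [hcast]; exact hmd
                exact_mod_cast this
              exact hall p.toNat hprime (by omega) h1 h2
            rw [if_neg hnmk]
            exact (hinv i hi).mpr ⟨h2i, fun q hq hqp hqs hqd => hall q hq (by omega) hqs hqd⟩
        obtain ⟨hsz', hchar'⟩ := ih _ hdec (p + 1) _ rfl (by omega) hinv'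
        refine ⟨hsz', fun i hi => ?_⟩
        rw [hchar' i hi]
        constructor
        · rintro ⟨h2i, hall⟩
          exact ⟨h2i, fun q hq hd hqs hqd => hall q hq ((hguard q).mpr hd) hqs hqd⟩
        · rintro ⟨h2i, hall⟩
          exact ⟨h2i, fun q hq hd hqs hqd => hall q hq ((hguard q).mp hd) hqs hqd⟩
      · -- sieve[p] is false: p is composite, predicate unchanged
        rw [if_neg hb]
        have hnprime : ¬ Nat.Prime p.toNat :=
          fun h => hb ((hinv _ hpn).mpr ((sievePred_self hp2).mpr h))
        have hinv' : SieveInv limit (p + 1) sv := by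
          refine ⟨hsz, fun i hi => ?_⟩
          rw [hinv i hi]
          constructor
          · rintro ⟨h2i, hall⟩
            refine ⟨h2i, fun q hq hql hqs hqd => ?_⟩
            by_cases hqp : (q : Int) < p
            · exact hall q hq hqp hqs hqd
            · have hqe : q = p.toNat := by omega
              exact absurd (hqe ▸ hq) hnprime
          · rintro ⟨h2i, hall⟩
            exact ⟨h2i, fun q hq hqp hqs hqd => hall q hq (by omega) hqs hqd⟩
        obtain ⟨hsz', hchar'⟩ := ih _ hdec (p + 1) _ rfl (by omega) hinv'
        refine ⟨hsz', fun i hi => ?_⟩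
        rw [hchar' i hi]
        constructor
        · rintro ⟨h2i, hall⟩
          exact ⟨h2i, fun q hq hd hqs hqd => hall q hq ((hguard q).mpr hd) hqs hqd⟩
        · rintro ⟨h2i, hall⟩
          exact ⟨h2i, fun q hq hd hqs hqd => hall q hq ((hguard q).mp hd) hqs hqd⟩
    · rw [dif_neg hpl]
      refine ⟨hsz, fun i hi => ?_⟩
      rw [hinv i hi]
      unfold sievePred
      constructor
      · rintro ⟨h2i, hall⟩
        refine ⟨h2i, fun q hq hd hqs hqd => ?_⟩
        rcases hd with h | h
        · exact hall q hq h hqs hqd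
        · have hq0 : (0 : Int) ≤ (q : Int) := Int.natCast_nonneg q
          have : (q : Int) < p := by nlinarith
          exact hall q hq this hqs hqd
      · rintro ⟨h2i, hall⟩
        exact ⟨h2i, fun q hq hqp hqs hqd => hall q hq (Or.inl hqp) hqs hqd⟩

-- the initial array satisfies the invariant at p = 2
lemma sieve0_inv (limit : Int) :
    SieveInv limit 2 (Array.setIfInBounds
      (Array.setIfInBounds (Array.replicate (limit + 1).toNat true) 0 false) 1 false) := by
  constructor
  · simp [Array.size_setIfInBounds, Array.size_replicate]
  · intro i hi
    rw [getD_setIfInBounds_false, getD_setIfInBounds_false]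
    have hrep : (Array.replicate (limit + 1).toNat true).getD i false = true := by
      simp [Array.getD_eq_getD_getElem?, hi]
    unfold sievePred
    by_cases h1 : i = 1
    · simp [h1]
    · by_cases h0 : i = 0
      · simp [h0]
      · simp only [h1, h0, if_false, hrep, true_iff]
        refine ⟨by omega, fun q hq hql _ _ => ?_⟩
        have h2q : 2 ≤ q := hq.two_le
        omega

-- ---------- characterising A's index-collecting fold ----------

def selIdx (limit : Int) : List Bool → Int → List Int
  | [], _ => []
  | b :: t, k => (if b && decide (k * k ≤ limit) then [k] else []) ++ selIdx limit t (k + 1)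

lemma foldl_selIdx (limit : Int) : ∀ (l : List Bool) (acc : List Int) (k : Int),
    (l.foldl (fun (acc : List Int × Int) b =>
      (if b && decide (acc.2 * acc.2 ≤ limit) then acc.1 ++ [acc.2] else acc.1, acc.2 + 1))
      (acc, k)).1
    = acc ++ selIdx limit l k := by
  intro l
  induction l with
  | nil => simp [selIdx]
  | cons b t ih =>
    intro acc k
    simp only [List.foldl_cons, selIdx]
    by_cases hb : (b && decide (k * k ≤ limit)) = true
    · rw [if_pos hb, if_pos hb, ih]
      simp
    · rw [if_neg hb, if_neg hb, ih]
      simp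

lemma mem_selIdx (limit : Int) : ∀ (l : List Bool) (k x : Int),
    x ∈ selIdx limit l k ↔
      ∃ j : Nat, ∃ _ : j < l.length, l[j] = true ∧ x = k + j ∧ x * x ≤ limit := by
  intro l
  induction l with
  | nil => simp [selIdx]
  | cons b t ih =>
    intro k x
    simp only [selIdx, List.mem_append, ih]
    constructor
    · rintro (hx | ⟨j, hj, hjt, rfl, hxl⟩)
      · by_cases hb : b && decide (k * k ≤ limit)
        · simp only [hb, if_true, List.mem_singleton] at hx
          subst hx
          simp only [Bool.and_eq_true, decide_eq_true_eq] at hb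
          exact ⟨0, by simp, by simpa using hb.1, by simp, hb.2⟩
        · simp [hb] at hx
      · exact ⟨j + 1, by simpa using Nat.succ_lt_succ hj, by simpa using hjt,
          by push_cast; ring, hxl⟩
    · rintro ⟨j, hj, hjt, rfl, hxl⟩
      cases j with
      | zero =>
        left
        have hb : b = true := by simpa using hjt
        simp only [hb, Bool.true_and, Nat.cast_zero, add_zero] at hxl ⊢
        simp [hxl]
      | succ j' =>
        right
        exact ⟨j', by simpa using Nat.lt_of_succ_lt_succ hj, by simpa using hjt,
          by push_cast; ring, hxl⟩

lemma lb_selIdx (limit : Int) : ∀ (l : List Bool) (k : Int), ∀ x ∈ selIdx limit l k, k ≤ x := by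
  intro l
  induction l with
  | nil => simp [selIdx]
  | cons b t ih =>
    intro k x hx
    simp only [selIdx, List.mem_append] at hx
    rcases hx with hx | hx
    · split_ifs at hx with h
      · simp only [List.mem_singleton] at hx; omega
      · simp at hx
    · have := ih (k + 1) x hx; omega

lemma pairwise_selIdx (limit : Int) : ∀ (l : List Bool) (k : Int),
    (selIdx limit l k).Pairwise (· < ·) := by
  intro l
  induction l with
  | nil => simp [selIdx]
  | cons b t ih =>
    intro k
    simp only [selIdx]
    rw [List.pairwise_append]
    refine ⟨by split_ifs <;> simp, ih (k + 1), ?_⟩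
    intro a ha x hx
    have := lb_selIdx limit t (k + 1) x hx
    split_ifs at ha with h
    · simp only [List.mem_singleton] at ha; omega
    · simp at ha

-- ---------- characterising B's trial-division loop ----------

lemma trialLoop_acc (limit : Int) : ∀ (n : Nat) (p : Int) (acc : List Int),
    n = (limit + 1 - p).toNat → trialLoop limit p acc = acc ++ trialLoop limit p [] := by
  intro n
  induction n using Nat.strong_induction_on with
  | _ n ih =>
    intro p acc hn
    by_cases hpl : p * p ≤ limit
    · have hdec : (limit + 1 - (p + 1)).toNat < n := hn ▸ sieveLoop_dec hpl
      conv_lhs => rw [trialLoop]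
      conv_rhs => rw [trialLoop]
      simp only [dif_pos hpl]
      split_ifs with hc
      · rw [ih _ hdec (p + 1) (acc ++ [p]) rfl, ih _ hdec (p + 1) ([] ++ [p]) rfl]
        simp
      · rw [ih _ hdec (p + 1) acc rfl]
    · conv_lhs => rw [trialLoop]
      conv_rhs => rw [trialLoop]
      simp only [dif_neg hpl]
      simp

lemma mem_trialLoop (limit : Int) : ∀ (n : Nat) (p : Int), n = (limit + 1 - p).toNat → 2 ≤ p →
    (∀ x, (x ∈ trialLoop limit p [] ↔ p ≤ x ∧ x * x ≤ limit ∧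
      (PySem.List.pyRange 2 x 1).all (fun d => PySem.Int.mod x d != 0) = true)) ∧
    (trialLoop limit p []).Pairwise (· < ·) := by
  intro n
  induction n using Nat.strong_induction_on with
  | _ n ih =>
    intro p hn hp2
    rw [trialLoop]
    by_cases hpl : p * p ≤ limit
    · rw [dif_pos hpl]
      have hdec : (limit + 1 - (p + 1)).toNat < n := hn ▸ sieveLoop_dec hpl
      obtain ⟨ihm, ihp⟩ := ih _ hdec (p + 1) rfl (by omega)
      rw [trialLoop_acc limit (limit + 1 - (p + 1)).toNat (p + 1) _ rfl]
      constructor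
      · intro x
        simp only [List.mem_append, ihm]
        constructor
        · rintro (hx | ⟨h1, h2, h3⟩)
          · split_ifs at hx with hc
            · simp only [List.nil_append, List.mem_singleton] at hx
              subst hx
              exact ⟨le_refl _, hpl, hc⟩
            · simp at hx
          · exact ⟨by omega, h2, h3⟩
        · rintro ⟨h1, h2, h3⟩
          by_cases hxp : x = p
          · subst hxp
            left
            simp [h3]
          · exact Or.inr ⟨by omega, h2, h3⟩
      · rw [List.pairwise_append]
        refine ⟨by split_ifs <;> simp, ihp, ?_⟩
        intro a ha x hx
        have := ((ihm x).mp hx).1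
        split_ifs at ha with h
        · simp only [List.nil_append, List.mem_singleton] at ha; omega
        · simp at ha
    · rw [dif_neg hpl]
      refine ⟨fun x => ?_, by simp⟩
      simp only [List.not_mem_nil, false_iff]
      rintro ⟨h1, h2, _⟩
      exact hpl (by nlinarith)

-- trial division detects primality (for x ≥ 2)
lemma trialOK_iff_prime {x : Int} (h2 : 2 ≤ x) :
    (PySem.List.pyRange 2 x 1).all (fun d => PySem.Int.mod x d != 0) = true ↔
      Nat.Prime x.toNat := by
  have hcast : ((x.toNat : Int)) = x := Int.toNat_of_nonneg (by omega)
  rw [List.all_eq_true]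
  constructor
  · intro hall
    rw [Nat.prime_def_lt']
    refine ⟨by omega, fun m hm2 hmx hmd => ?_⟩
    have hmem : (m : Int) ∈ PySem.List.pyRange 2 x 1 :=
      (PySem.List.mem_pyRange_one).mpr ⟨by exact_mod_cast hm2, by omega⟩
    have hne := hall _ hmem
    simp only [bne_iff_ne, ne_eq] at hne
    apply hne
    rw [PySem.Int.mod_eq_zero_iff_dvd]
    have hdc : (m : Int) ∣ ((x.toNat : Int)) := by exact_mod_cast hmd
    rwa [hcast] at hdc
  · intro hp d hd
    obtain ⟨hd2, hdx⟩ := (PySem.List.mem_pyRange_one).mp hd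
    simp only [bne_iff_ne, ne_eq, PySem.Int.mod_eq_zero_iff_dvd]
    intro hdvd
    have hdn : d.toNat ∣ x.toNat := by
      have hc2 : ((d.toNat : Int)) ∣ ((x.toNat : Int)) := by
        rw [Int.toNat_of_nonneg (by omega : (0:Int) ≤ d), hcast]
        exact hdvd
      exact_mod_cast hc2
    exact ((Nat.prime_def_lt').mp hp).2 d.toNat (by omega) (by omega) hdn

lemma toList_getD (F : Array Bool) (j : Nat) (hj : j < F.toList.length) :
    F.toList[j] = F.getD j false := by
  rw [Array.getD_eq_getD_getElem?, Array.getElem?_eq_getElem (by simpa using hj)]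
  simp

-- both prime lists collect exactly {x | 2 ≤ x, x² ≤ limit, x.toNat prime}, in increasing order
lemma primes_eq (limit : Int) (hl : 1 ≤ limit) : sievePrimes limit = trialLoop limit 2 [] := by
  obtain ⟨hsz, hc⟩ := sieveLoop_char limit (limit + 1 - 2).toNat 2 _ rfl (le_refl 2)
    (sieve0_inv limit)
  have hA : sievePrimes limit =
      selIdx limit (sieveLoop limit 2 (Array.setIfInBounds
        (Array.setIfInBounds (Array.replicate (limit + 1).toNat true) 0 false) 1 false)).toList 0 :=
    foldl_selIdx limit _ [] 0
  obtain ⟨hBm, hBp⟩ := mem_trialLoop limit (limit + 1 - 2).toNat 2 rfl (le_refl 2)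
  rw [hA]
  set F := sieveLoop limit 2 (Array.setIfInBounds
    (Array.setIfInBounds (Array.replicate (limit + 1).toNat true) 0 false) 1 false) with hF
  have hlen : F.toList.length = (limit + 1).toNat := by simp [hsz]
  have hAm : ∀ x, x ∈ selIdx limit F.toList 0 ↔
      (2 ≤ x ∧ x * x ≤ limit ∧ Nat.Prime x.toNat) := by
    intro x
    rw [mem_selIdx]
    constructor
    · rintro ⟨j, hj, hjt, rfl, hxl⟩
      simp only [zero_add] at hxl ⊢
      rw [toList_getD F j hj] at hjt
      rw [hlen] at hj
      obtain ⟨h2j, hall⟩ := (hc j hj).mp hjt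
      have hxl' : (j : Int) * (j : Int) ≤ limit := hxl
      have hprime : Nat.Prime j := (predF_iff_prime hxl').mp
        ⟨h2j, fun q hq hql hqs hqd => hall q hq (Or.inr hql) hqs hqd⟩
      exact ⟨by exact_mod_cast h2j, hxl, by simpa using hprime⟩
    · rintro ⟨h2x, hxl, hpx⟩
      have hx0 : (0 : Int) ≤ x := by omega
      have hxle : x ≤ limit := by nlinarith
      have hjlen : x.toNat < F.toList.length := by rw [hlen]; omega
      refine ⟨x.toNat, hjlen, ?_, by rw [Int.toNat_of_nonneg hx0]; ring, hxl⟩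
      rw [toList_getD F x.toNat hjlen]
      rw [hc x.toNat (by rw [← hlen]; exact hjlen)]
      have hxl' : ((x.toNat : Int)) * ((x.toNat : Int)) ≤ limit := by
        rw [Int.toNat_of_nonneg hx0]; exact hxl
      obtain ⟨h2j, hall⟩ := (predF_iff_prime hxl').mpr hpx
      refine ⟨h2j, fun q hq hd hqs hqd => ?_⟩
      rcases hd with h | h
      · have := hq.two_le; omega
      · exact hall q hq h hqs hqd
  have hnodA : (selIdx limit F.toList 0).Nodup :=
    (pairwise_selIdx limit F.toList 0).imp (fun h => ne_of_lt h)
  have hnodB : (trialLoop limit 2 []).Nodup := hBp.imp (fun h => ne_of_lt h)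
  have hmem : ∀ x, x ∈ selIdx limit F.toList 0 ↔ x ∈ trialLoop limit 2 [] := by
    intro x
    rw [hAm, hBm]
    constructor
    · rintro ⟨h1, h2, h3⟩
      exact ⟨h1, h2, (trialOK_iff_prime h1).mpr h3⟩
    · rintro ⟨h1, h2, h3⟩
      exact ⟨h1, h2, (trialOK_iff_prime h1).mp h3⟩
  exact List.Perm.eq_of_pairwise
    (fun a b _ _ hab hba => absurd hba (lt_asymm hab))
    (pairwise_selIdx limit F.toList 0) hBp
    ((List.perm_ext_iff_of_nodup hnodA hnodB).mpr hmem)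

-- ===== VERDICT (by name: the statement is the Claim_ definition above) =====
theorem solve_spec : Claim_equal_solve := by
  intro limit _ hpre
  unfold Spec_solve solve solve_alt
  rw [primes_eq limit hpre]
  exact main_len limit _ _ _
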